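-- pv_equiv track=rewrite | github.com/0nandeesh/Multimodal-Data-Extraction-Processing-Pipeline | app.py | select_track
-- ===== SOURCE A (Python) =====
-- def select_track(tracks, langs=["en"]):
--     if not tracks: return None
--     for code in langs:
--         for t in tracks:
--             if t.get("languageCode") == code and t.get("kind") != "asr": return t
--     for code in langs:
--         for t in tracks:
--             if t.get("languageCode") == code and t.get("kind") == "asr": return t
--     return tracks[0]
-- ===== SOURCE B (Python) =====
-- def select_track(tracks, langs=["en"]):
--     if not tracks:
--         return None
--     # one pass over tracks: languageCode -> [first non-asr track, first asr track]
--     index = {}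
--     for t in tracks:
--         slot = index.setdefault(t.get("languageCode"), [None, None])
--         pos = 1 if t.get("kind") == "asr" else 0
--         if slot[pos] is None:
--             slot[pos] = t
--     # one pass over langs: first non-asr wins; remember first asr candidate
--     asr_fallback = None
--     for code in langs:
--         slot = index.get(code)
--         if slot is not None:
--             if slot[0] is not None:
--                 return slot[0]
--             if asr_fallback is None:
--                 asr_fallback = slot[1]
--     return asr_fallback if asr_fallback is not None else tracks[0]
-- ===== Notes on version B (the rewrite author's own statement) =====
-- stated objective: faster
-- what changed: Replaces A's up-to-four nested prioritized scans (each lang rescans all tracks, twice) with one indexing pass over tracks building a languageCode -> (first non-asr, first asr) table, then a single pass over langs consulting the table.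
import Mathlib
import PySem

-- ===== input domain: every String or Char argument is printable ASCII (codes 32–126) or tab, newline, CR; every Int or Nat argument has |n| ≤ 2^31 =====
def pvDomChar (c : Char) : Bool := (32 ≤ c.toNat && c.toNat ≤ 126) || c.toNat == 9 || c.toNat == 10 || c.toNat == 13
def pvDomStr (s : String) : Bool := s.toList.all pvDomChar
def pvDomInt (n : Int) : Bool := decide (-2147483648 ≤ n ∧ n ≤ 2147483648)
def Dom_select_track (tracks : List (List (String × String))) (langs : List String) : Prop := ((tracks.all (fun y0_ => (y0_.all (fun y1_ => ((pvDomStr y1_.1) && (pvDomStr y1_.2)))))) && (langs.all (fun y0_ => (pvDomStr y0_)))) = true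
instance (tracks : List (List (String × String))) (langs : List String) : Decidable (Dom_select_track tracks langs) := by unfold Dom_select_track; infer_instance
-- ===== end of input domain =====

-- B replaces A's up-to-four nested prioritized scans with one indexing pass over tracks
-- (languageCode -> first non-asr / first asr track) plus a single pass over langs.

-- ===== PORT A =====
-- t.get(k) on a Python dict given as an association list (first match)
def tGet (t : List (String × String)) (k : String) : Option String := (PySem.Dict.mk t).get? k

-- loop-body condition of A's first pass: languageCode == code and kind != "asr"
def isMain (code : String) (t : List (String × String)) : Bool :=
  tGet t "languageCode" == some code && !(tGet t "kind" == some "asr")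

-- loop-body condition of A's second pass: languageCode == code and kind == "asr"
def isAsrMatch (code : String) (t : List (String × String)) : Bool :=
  tGet t "languageCode" == some code && (tGet t "kind" == some "asr")

def select_track (tracks : List (List (String × String))) (langs : List String) : Option (List (String × String)) :=
  if tracks.isEmpty then none
  else
    match langs.findSome? (fun code => tracks.find? (isMain code)) with
    | some t => some t
    | none =>
      match langs.findSome? (fun code => tracks.find? (isAsrMatch code)) with
      | some t => some t
      | none => PySem.List.pyGet? tracks 0

-- ===== PORT B =====
-- one step of B's indexing pass: slot = index.setdefault(t.get("languageCode"), [None, None]);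
-- fill slot position 1 (asr) or 0 (non-asr) if it is still empty
def addTrack (d : PySem.Dict (Option String) (Option (List (String × String)) × Option (List (String × String))))
    (t : List (String × String)) :
    PySem.Dict (Option String) (Option (List (String × String)) × Option (List (String × String))) :=
  let code := tGet t "languageCode"
  let slot := d.getD code (none, none)
  let slot' :=
    if tGet t "kind" == some "asr" then
      (slot.1, if slot.2.isNone then some t else slot.2)
    else
      (if slot.1.isNone then some t else slot.1, slot.2)
  d.insert code slot'

-- B's pass over langs with the asr_fallback accumulator (Python's early return = stop of the recursion)
def altLoop (tracks : List (List (String × String)))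
    (idx : PySem.Dict (Option String) (Option (List (String × String)) × Option (List (String × String)))) :
    List String → Option (List (String × String)) → Option (List (String × String))
  | [], fb =>
    match fb with
    | some t => some t
    | none => PySem.List.pyGet? tracks 0
  | code :: rest, fb =>
    match idx.get? (some code) with
    | none => altLoop tracks idx rest fb
    | some slot =>
      match slot.1 with
      | some t => some t
      | none => altLoop tracks idx rest (if fb.isNone then slot.2 else fb)

def select_track_alt (tracks : List (List (String × String))) (langs : List String) : Option (List (String × String)) :=
  if tracks.isEmpty then none
  else altLoop tracks (tracks.foldl addTrack PySem.Dict.empty) langs none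

-- ===== PRECONDITION & SPEC =====
def Spec_select_track (tracks : List (List (String × String))) (langs : List String) (out : Option (List (String × String))) : Prop := out = select_track_alt tracks langs
instance (tracks : List (List (String × String))) (langs : List String) (out : Option (List (String × String))) : Decidable (Spec_select_track tracks langs out) := by unfold Spec_select_track; infer_instance

-- ===== CLAIM (what is proved, stated in full; the proofs are below) =====
def Claim_equal_select_track : Prop := ∀ (tracks : List (List (String × String))) (langs : List String), Dom_select_track tracks langs → Spec_select_track tracks langs (select_track tracks langs)

-- ===== LEMMAS AND PROOFS =====

-- the dict built by B's indexing pass, characterized by A-style find?-scans over the tracks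
theorem build_get? (ts : List (List (String × String)))
    (d : PySem.Dict (Option String) (Option (List (String × String)) × Option (List (String × String))))
    (k : Option String) :
    (ts.foldl addTrack d).get? k =
      match d.get? k with
      | some s =>
          some (s.1.orElse (fun _ => ts.find? (fun t => tGet t "languageCode" == k && !(tGet t "kind" == some "asr"))),
                s.2.orElse (fun _ => ts.find? (fun t => tGet t "languageCode" == k && (tGet t "kind" == some "asr"))))
      | none =>
          if ts.any (fun t => tGet t "languageCode" == k) then
            some (ts.find? (fun t => tGet t "languageCode" == k && !(tGet t "kind" == some "asr")),
                  ts.find? (fun t => tGet t "languageCode" == k && (tGet t "kind" == some "asr")))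
          else none := by
  induction ts generalizing d with
  | nil =>
    cases h : d.get? k with
    | none => simp [h]
    | some s => obtain ⟨s1, s2⟩ := s; cases s1 <;> cases s2 <;> simp [h, Option.orElse]
  | cons t ts ih =>
    rw [List.foldl_cons, ih]
    by_cases hk : k = tGet t "languageCode"
    · subst hk
      simp only [addTrack, PySem.Dict.get?_insert, PySem.Dict.getD_eq_get?_getD]
      cases hd : d.get? (tGet t "languageCode") with
      | none =>
        by_cases ha : (tGet t "kind" == some "asr") = true <;>
          simp [hd, List.any_cons, ha, Option.orElse]
      | some s =>
        obtain ⟨s1, s2⟩ := s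
        by_cases ha : (tGet t "kind" == some "asr") = true <;>
          cases s1 <;> cases s2 <;>
          simp [hd, ha, Option.orElse]
    · have hb : (tGet t "languageCode" == k) = false := by
        simp [beq_eq_false_iff_ne]; exact fun h => hk h.symm
      have hg : (addTrack d t).get? k = d.get? k := by
        simp [addTrack, PySem.Dict.get?_insert, hk]
      rw [hg]
      cases hd : d.get? k <;> simp [List.any_cons, hb]

-- specialization to the empty starting dict, with A's named scan conditions
theorem build_get?_empty (tracks : List (List (String × String))) (code : String) :
    (tracks.foldl addTrack PySem.Dict.empty).get? (some code) =
      if tracks.any (fun t => tGet t "languageCode" == some code) then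
        some (tracks.find? (isMain code), tracks.find? (isAsrMatch code))
      else none := by
  rw [build_get?]
  simp [PySem.Dict.get?_empty]
  rfl

-- B's langs pass computes A's two prioritized scans (with the fallback accumulator folded in)
theorem loop_spec (tracks : List (List (String × String))) (langs : List String)
    (fb : Option (List (String × String))) :
    altLoop tracks (tracks.foldl addTrack PySem.Dict.empty) langs fb =
      match langs.findSome? (fun code => tracks.find? (isMain code)) with
      | some t => some t
      | none =>
        match fb.orElse (fun _ => langs.findSome? (fun code => tracks.find? (isAsrMatch code))) with
        | some t => some t
        | none => PySem.List.pyGet? tracks 0 := by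
  induction langs generalizing fb with
  | nil => cases fb <;> simp [altLoop, Option.orElse]
  | cons code rest ih =>
    rw [altLoop, build_get?_empty]
    cases hany : tracks.any (fun t => tGet t "languageCode" == some code) with
    | false =>
      have hall := List.any_eq_false.mp hany
      have h1 : tracks.find? (isMain code) = none := by
        rw [List.find?_eq_none]; intro x hx
        have := hall x hx; simp [isMain]; simp at this; simp [this]
      have h2 : tracks.find? (isAsrMatch code) = none := by
        rw [List.find?_eq_none]; intro x hx
        have := hall x hx; simp [isAsrMatch]; simp at this; simp [this]
      rw [if_neg (by simp), ih]
      simp [List.findSome?_cons, h1, h2]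
    | true =>
      simp only [if_pos rfl]
      cases hN : tracks.find? (isMain code) with
      | some t => simp [List.findSome?_cons, hN]
      | none =>
        cases fb with
        | some t => simp [ih, List.findSome?_cons, hN, Option.orElse]
        | none =>
          cases hA : tracks.find? (isAsrMatch code) <;>
            simp [ih, List.findSome?_cons, hN, hA, Option.orElse]

-- ===== VERDICT (by name: the statement is the Claim_ definition above) =====
theorem select_track_spec : Claim_equal_select_track := by
  intro tracks langs _
  unfold Spec_select_track select_track select_track_alt
  by_cases h : tracks.isEmpty
  · simp [h]
  · simp only [h, loop_spec]
    cases langs.findSome? (fun code => tracks.find? (isMain code)) <;> simp [Option.orElse]
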